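-- pv_equiv track=rewrite | github.com/jiphelsen/Spock | benchmarking/o_metric.py | group_file_sizes
-- ===== SOURCE A (Python) =====
-- def group_file_sizes(file_sizes, groups):
--     """Group file sizes based on user-defined groups."""
--     grouped_sizes = {group_name: 0 for group_name in groups.keys()}
--
--     # Calculate sizes for each group
--     for file, size in file_sizes.items():
--         for group_name, patterns in groups.items():
--             if any(pattern in file for pattern in patterns):
--                 grouped_sizes[group_name] += size
--                 break
--
--     return grouped_sizes
-- ===== SOURCE B (Python) =====
-- def group_file_sizes(file_sizes, groups):
--     """Group file sizes based on user-defined groups.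
--
--     Group-major sieve: for each group in order, sum the sizes of the still-
--     unclaimed files it matches, then drop those files from the pool, so each
--     file is claimed by its first matching group exactly as in A."""
--     result = {}
--     remaining = list(file_sizes.items())
--     for name, patterns in groups.items():
--         result[name] = sum(s for f, s in remaining
--                            if any(p in f for p in patterns))
--         remaining = [(f, s) for f, s in remaining
--                      if not any(p in f for p in patterns)]
--     return result
-- ===== Notes on version B (the rewrite author's own statement) =====
-- stated objective: alternative
-- what changed: Replaces A's file-major nested loop with break by a group-major sieve: each group sums the sizes of the still-unclaimed files it matches and removes them from the pool, so no break/first-match scan per file is needed.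
import Mathlib
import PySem

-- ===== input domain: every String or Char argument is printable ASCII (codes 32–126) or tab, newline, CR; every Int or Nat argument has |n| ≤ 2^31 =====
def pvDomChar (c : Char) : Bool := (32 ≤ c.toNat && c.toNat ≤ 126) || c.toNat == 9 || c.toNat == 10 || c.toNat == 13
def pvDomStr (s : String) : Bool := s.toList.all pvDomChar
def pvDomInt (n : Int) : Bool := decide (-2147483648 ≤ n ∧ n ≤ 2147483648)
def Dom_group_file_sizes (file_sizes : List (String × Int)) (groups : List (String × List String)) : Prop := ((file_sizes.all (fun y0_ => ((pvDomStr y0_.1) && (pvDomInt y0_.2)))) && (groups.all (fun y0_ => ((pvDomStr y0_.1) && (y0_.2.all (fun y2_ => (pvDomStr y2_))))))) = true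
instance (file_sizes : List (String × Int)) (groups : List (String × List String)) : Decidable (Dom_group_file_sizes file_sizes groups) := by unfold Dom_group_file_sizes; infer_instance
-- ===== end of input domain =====

-- B replaces A's file-major nested loop (break on first matching group) by a group-major
-- sieve over a shrinking pool of unclaimed files; same return value, objective: alternative.

-- ===== PORT A =====
def group_file_sizes (file_sizes : List (String × Int)) (groups : List (String × List String)) : List (String × Int) :=
  let fsd : PySem.Dict String Int := PySem.Dict.ofList file_sizes
  let gsd : PySem.Dict String (List String) := PySem.Dict.ofList groups
  -- grouped_sizes = {group_name: 0 for group_name in groups.keys()}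
  let grouped : PySem.Dict String Int := gsd.keys.foldl (fun d n => d.insert n 0) PySem.Dict.empty
  -- for file, size: scan groups for the first match (the inner for with break), add size there
  let final := fsd.items.foldl (fun d fe =>
    match gsd.items.find? (fun ge => ge.2.any (fun pattern => PySem.Str.isIn pattern fe.1)) with
    | some ge => d.modify ge.1 0 (fun v => v + fe.2)
    | none => d) grouped
  final.items

-- ===== PORT B =====
def pvSieve (gs : List (String × List String)) (remaining : List (String × Int)) : List (String × Int) :=
  match gs with
  | [] => []
  | (name, pats) :: rest =>
    (name, ((remaining.filter (fun fe => pats.any (fun p => PySem.Str.isIn p fe.1))).map (fun fe => fe.2)).sum)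
      :: pvSieve rest (remaining.filter (fun fe => !pats.any (fun p => PySem.Str.isIn p fe.1)))

def group_file_sizes_alt (file_sizes : List (String × Int)) (groups : List (String × List String)) : List (String × Int) :=
  pvSieve (PySem.Dict.ofList groups).items (PySem.Dict.ofList file_sizes).items

-- ===== PRECONDITION & SPEC =====
def Spec_group_file_sizes (file_sizes : List (String × Int)) (groups : List (String × List String)) (out : List (String × Int)) : Prop := out = group_file_sizes_alt file_sizes groups
instance (file_sizes : List (String × Int)) (groups : List (String × List String)) (out : List (String × Int)) : Decidable (Spec_group_file_sizes file_sizes groups out) := by unfold Spec_group_file_sizes; infer_instance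

-- ===== CLAIM (what is proved, stated in full; the proofs are below) =====
def Claim_equal_group_file_sizes : Prop := ∀ (file_sizes : List (String × Int)) (groups : List (String × List String)), Dom_group_file_sizes file_sizes groups → Spec_group_file_sizes file_sizes groups (group_file_sizes file_sizes groups)

-- ===== LEMMAS AND PROOFS =====

-- does a file name match one of the group's patterns
def pvMatch (pats : List String) (f : String) : Bool := pats.any (fun p => PySem.Str.isIn p f)

-- the name of the first group (in list order) matching file name f
def pvFirst (gs : List (String × List String)) (f : String) : Option String :=
  (gs.find? (fun ge => pvMatch ge.2 f)).map (·.1)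

-- reference value: each group paired with the total size of the files whose FIRST match it is
def pvRef (gs : List (String × List String)) (fs : List (String × Int)) : List (String × Int) :=
  gs.map (fun g => (g.1, ((fs.filter (fun fe => pvFirst gs fe.1 == some g.1)).map (fun fe => fe.2)).sum))

theorem pvFirst_cons (n : String) (ps : List String) (R : List (String × List String)) (f : String) :
    pvFirst ((n, ps) :: R) f = if pvMatch ps f then some n else pvFirst R f := by
  simp [pvFirst, List.find?_cons]
  split_ifs with h <;> simp_all

theorem pvFirst_mem {R : List (String × List String)} {f x : String}
    (h : pvFirst R f = some x) : x ∈ R.map (·.1) := by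
  unfold pvFirst at h
  cases hf : R.find? (fun ge => pvMatch ge.2 f) with
  | none => simp [hf] at h
  | some ge =>
    simp [hf] at h
    exact h ▸ List.mem_map_of_mem (List.mem_of_find?_eq_some hf)

-- B equals the reference
theorem pvSieve_eq_ref (gs : List (String × List String)) (hnd : (gs.map (·.1)).Nodup) :
    ∀ fs, pvSieve gs fs = pvRef gs fs := by
  induction gs with
  | nil => intro fs; simp [pvSieve, pvRef]
  | cons g R ih =>
    obtain ⟨n, ps⟩ := g
    simp only [List.map_cons, List.nodup_cons] at hnd
    obtain ⟨hn, hR⟩ := hnd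
    intro fs
    have hhead : fs.filter (fun fe => pvFirst ((n, ps) :: R) fe.1 == some n)
        = fs.filter (fun fe => pvMatch ps fe.1) := by
      apply List.filter_congr
      intro fe _
      rw [pvFirst_cons]
      by_cases h : pvMatch ps fe.1
      · simp [h]
      · simp only [h, if_neg, Bool.false_eq_true, not_false_eq_true, if_neg]
        simp
        intro habs
        exact hn (pvFirst_mem habs)
    have htail : ∀ g' ∈ R,
        fs.filter (fun fe => pvFirst ((n, ps) :: R) fe.1 == some g'.1)
        = (fs.filter (fun fe => !pvMatch ps fe.1)).filter (fun fe => pvFirst R fe.1 == some g'.1) := by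
      intro g' hg'
      rw [List.filter_filter]
      apply List.filter_congr
      intro fe _
      rw [pvFirst_cons]
      by_cases h : pvMatch ps fe.1
      · have : n ≠ g'.1 := by
          intro he; exact hn (he ▸ List.mem_map_of_mem hg')
        simp [h, this]
      · simp [h]
    calc pvSieve ((n, ps) :: R) fs
        = (n, ((fs.filter (fun fe => pvMatch ps fe.1)).map (fun fe => fe.2)).sum)
            :: pvSieve R (fs.filter (fun fe => !pvMatch ps fe.1)) := rfl
      _ = pvRef ((n, ps) :: R) fs := by
          rw [ih hR]
          unfold pvRef
          simp only [List.map_cons]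
          rw [hhead]
          refine congrArg₂ List.cons rfl ?_
          exact (List.map_congr_left (fun g' hg' => by rw [htail g' hg'])).symm

-- A's per-file step: add the size to the first matching group, if any
def pvStep (G : List (String × List String)) (d : PySem.Dict String Int) (fe : String × Int) : PySem.Dict String Int :=
  match G.find? (fun ge => ge.2.any (fun pattern => PySem.Str.isIn pattern fe.1)) with
  | some ge => d.modify ge.1 0 (fun v => v + fe.2)
  | none => d

theorem pvStep_none {G : List (String × List String)} {fe : String × Int}
    (h : G.find? (fun ge => ge.2.any (fun pattern => PySem.Str.isIn pattern fe.1)) = none)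
    (d : PySem.Dict String Int) : pvStep G d fe = d := by
  unfold pvStep; rw [h]

theorem pvStep_some {G : List (String × List String)} {fe : String × Int} {ge : String × List String}
    (h : G.find? (fun ge => ge.2.any (fun pattern => PySem.Str.isIn pattern fe.1)) = some ge)
    (d : PySem.Dict String Int) : pvStep G d fe = d.modify ge.1 0 (fun v => v + fe.2) := by
  unfold pvStep; rw [h]

-- A's fold leaves every key of the dict in place
theorem pvAfold_keys (G : List (String × List String)) (fs : List (String × Int)) :
    ∀ d : PySem.Dict String Int, (∀ ge ∈ G, ge.1 ∈ d.keys) →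
      (fs.foldl (pvStep G) d).keys = d.keys := by
  induction fs with
  | nil => intro d _; rfl
  | cons fe fs ih =>
    intro d hd
    rw [List.foldl_cons]
    cases hfind : G.find? (fun ge => ge.2.any (fun pattern => PySem.Str.isIn pattern fe.1)) with
    | none => rw [pvStep_none hfind]; exact ih d hd
    | some ge =>
      rw [pvStep_some hfind]
      have hc : d.contains ge.1 = true :=
        (PySem.Dict.contains_iff_mem_keys d ge.1).2 (hd ge (List.mem_of_find?_eq_some hfind))
      have hk : (d.modify ge.1 0 (fun v => v + fe.2)).keys = d.keys := by
        rw [PySem.Dict.keys_modify, PySem.Dict.keys_insert_of_contains _ _ hc]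
      rw [← hk] at hd
      rw [ih _ hd, hk]

-- A's fold accumulates, at each key, the sizes of the files whose first match is that key
theorem pvAfold_getD (G : List (String × List String)) (fs : List (String × Int)) :
    ∀ (d : PySem.Dict String Int) (n : String),
      (fs.foldl (pvStep G) d).getD n 0
      = d.getD n 0 + ((fs.filter (fun fe => pvFirst G fe.1 == some n)).map (fun fe => fe.2)).sum := by
  induction fs with
  | nil => intro d n; simp
  | cons fe fs ih =>
    intro d n
    rw [List.foldl_cons]
    cases hfind : G.find? (fun ge => ge.2.any (fun pattern => PySem.Str.isIn pattern fe.1)) with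
    | none =>
      have hfe : pvFirst G fe.1 = none := by
        unfold pvFirst pvMatch; rw [hfind]; rfl
      rw [pvStep_none hfind, ih]
      simp [hfe]
    | some ge =>
      have hfe : pvFirst G fe.1 = some ge.1 := by
        unfold pvFirst pvMatch; rw [hfind]; rfl
      rw [pvStep_some hfind, ih]
      by_cases h : n = ge.1
      · subst h
        rw [PySem.Dict.getD_modify]
        simp [hfe]
        ring
      · rw [PySem.Dict.getD_modify]
        simp [hfe, h, Ne.symm h]

-- the zero-initialised dict over nodup keys
theorem pvInit_keys (ks : List String) (hk : ks.Nodup) :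
    ((ks.foldl (fun d n => d.insert n 0) (PySem.Dict.empty : PySem.Dict String Int))).keys = ks := by
  rw [PySem.Dict.keys_foldl_insert (f := fun _ _ => (0 : Int))]
  show PySem.Set.update ([] : PySem.Set String) ks = ks
  show PySem.Set.ofList ks = ks
  exact PySem.Set.ofList_eq_self_of_nodup ks hk

theorem pvInit_getD (ks : List String) :
    ∀ (d : PySem.Dict String Int), (∀ n, d.getD n 0 = 0) →
      ∀ n, (ks.foldl (fun d n => d.insert n 0) d).getD n 0 = 0 := by
  induction ks with
  | nil => intro d hd n; exact hd n
  | cons k ks ih =>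
    intro d hd n
    rw [List.foldl_cons]
    apply ih
    intro m
    rw [PySem.Dict.getD_insert]
    split_ifs <;> simp [hd]

-- the whole equivalence, over an arbitrary items list F and group list G with distinct names
theorem pvMain (F : List (String × Int)) (G : List (String × List String))
    (hnd : (G.map (·.1)).Nodup) :
    (F.foldl (pvStep G) ((G.map (·.1)).foldl (fun d n => d.insert n 0) PySem.Dict.empty)).items
      = pvSieve G F := by
  set ks := G.map (·.1) with hks
  set d0 : PySem.Dict String Int := ks.foldl (fun d n => d.insert n 0) PySem.Dict.empty with hd0
  have hk0 : d0.keys = ks := pvInit_keys ks hnd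
  have hmem : ∀ ge ∈ G, ge.1 ∈ d0.keys := by
    intro ge hge; rw [hk0]; exact List.mem_map_of_mem hge
  have hkeys : (F.foldl (pvStep G) d0).keys = ks := by
    rw [pvAfold_keys G F d0 hmem, hk0]
  have hnodup : (F.foldl (pvStep G) d0).keys.Nodup := by rw [hkeys]; exact hnd
  rw [PySem.Dict.items_eq_map_keys _ hnodup 0, hkeys]
  have hval : ∀ n, (F.foldl (pvStep G) d0).getD n 0
      = ((F.filter (fun fe => pvFirst G fe.1 == some n)).map (fun fe => fe.2)).sum := by
    intro n
    rw [pvAfold_getD G F d0 n, pvInit_getD ks PySem.Dict.empty (fun n => PySem.Dict.getD_empty n 0)]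
    ring
  rw [pvSieve_eq_ref G hnd F]
  unfold pvRef
  rw [hks, List.map_map]
  exact List.map_congr_left (fun g _ => by rw [Function.comp_apply, hval])

-- ===== VERDICT (by name: the statement is the Claim_ definition above) =====
theorem group_file_sizes_spec : Claim_equal_group_file_sizes := by
  intro file_sizes groups _
  show group_file_sizes file_sizes groups = group_file_sizes_alt file_sizes groups
  exact pvMain (PySem.Dict.ofList file_sizes).items (PySem.Dict.ofList groups).items
    (PySem.Dict.nodup_keys_ofList groups)
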